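-- pv_equiv track=rewrite | github.com/minhcongnguyen1508/Vietnamese-Sentiment-Analysis | src/utils.py | y2sentiment
-- ===== SOURCE A (Python) =====
-- def y2sentiment(labels):
--     sentiments = []
--     distribution = [0, 0, 0]
--     for line in labels:
--         y_sentiment = [0, 0, 0] # NEG = -1; POS = 1, NEU = 0
--         if line[:3] == 'NEG':
--             y_sentiment[0] = 1
--             distribution[0] += 1
--             sentiments.append(y_sentiment)
--         elif line[:3] == 'POS':
--             y_sentiment[2] = 1
--             distribution[2] += 1
--             sentiments.append(y_sentiment)
--         else:
--             y_sentiment[1] = 1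
--             distribution[1] += 1
--             sentiments.append(y_sentiment)
--     return sentiments, distribution
-- ===== SOURCE B (Python) =====
-- ONE_HOT = {'NEG': [1, 0, 0], 'POS': [0, 0, 1]}
--
-- def y2sentiment(labels):
--     # divide and conquer: merge sub-results, distribution = vector sum
--     if not labels:
--         return [], [0, 0, 0]
--     if len(labels) == 1:
--         hot = ONE_HOT.get(labels[0][:3], [0, 1, 0])
--         return [list(hot)], list(hot)
--     mid = len(labels) // 2
--     left_sents, left_dist = y2sentiment(labels[:mid])
--     right_sents, right_dist = y2sentiment(labels[mid:])
--     return left_sents + right_sents, [x + y for x, y in zip(left_dist, right_dist)]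
-- ===== Notes on version B (the rewrite author's own statement) =====
-- stated objective: alternative
-- what changed: Replaces the single left-to-right loop that mutates a running distribution and hand-builds one-hot lists by index assignment with a divide-and-conquer recursion: leaves look the prefix up in a one-hot table, and halves are merged by concatenating sentiments and element-wise vector-adding the two sub-distributions.
import Mathlib
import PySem

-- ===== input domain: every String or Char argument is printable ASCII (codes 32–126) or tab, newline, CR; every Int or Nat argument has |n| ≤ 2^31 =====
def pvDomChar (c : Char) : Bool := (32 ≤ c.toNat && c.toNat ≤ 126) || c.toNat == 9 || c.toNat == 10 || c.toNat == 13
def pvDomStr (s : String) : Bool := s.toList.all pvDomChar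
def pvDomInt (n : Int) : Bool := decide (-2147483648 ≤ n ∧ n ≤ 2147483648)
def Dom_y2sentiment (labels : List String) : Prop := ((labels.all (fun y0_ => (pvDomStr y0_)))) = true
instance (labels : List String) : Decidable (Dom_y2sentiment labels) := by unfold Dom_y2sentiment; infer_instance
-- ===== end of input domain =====

-- B replaces A's accumulating loop by a divide-and-conquer recursion (table-lookup leaves, halves merged by list concatenation and element-wise addition of the two sub-distributions); equivalence of the return values is proved, no speed claim.


-- ===== PORT A =====
-- A: one loop; y_sentiment = [0,0,0] mutated at one index, distribution mutated in place.
def pvStepA (acc : List (List Int) × List Int) (line : String) : List (List Int) × List Int :=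
  let sentiments := acc.1
  let distribution := acc.2
  let y_sentiment : List Int := [0, 0, 0]
  if PySem.Str.slice line none (some 3) = "NEG" then
    (sentiments ++ [y_sentiment.set 0 1],
     distribution.set 0 (distribution.getD 0 0 + 1))
  else if PySem.Str.slice line none (some 3) = "POS" then
    (sentiments ++ [y_sentiment.set 2 1],
     distribution.set 2 (distribution.getD 2 0 + 1))
  else
    (sentiments ++ [y_sentiment.set 1 1],
     distribution.set 1 (distribution.getD 1 0 + 1))

def y2sentiment (labels : List String) : List (List Int) × List Int :=
  labels.foldl pvStepA ([], [0, 0, 0])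

-- ===== PORT B =====
-- B: module-level one-hot table; divide and conquer with vector-sum merge.
def pvOneHotTable : PySem.Dict String (List Int) :=
  PySem.Dict.ofList [("NEG", [1, 0, 0]), ("POS", [0, 0, 1])]

-- len(labels)//2 on the nonnegative Nat length coincides with Python's //
def y2sentiment_alt : List String → List (List Int) × List Int
  | [] => ([], [0, 0, 0])
  | [l] =>
    let hot := pvOneHotTable.getD (PySem.Str.slice l none (some 3)) [0, 1, 0]
    ([hot], hot)
  | l1 :: l2 :: rest =>
    let labels := l1 :: l2 :: rest
    let mid := labels.length / 2
    let left := y2sentiment_alt (labels.take mid)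
    let right := y2sentiment_alt (labels.drop mid)
    (left.1 ++ right.1, List.zipWith (· + ·) left.2 right.2)
termination_by labels => labels.length
decreasing_by
  · simp [List.length_take]; omega
  · simp [List.length_drop]; omega

-- ===== PRECONDITION & SPEC =====
def Spec_y2sentiment (labels : List String) (out : List (List Int) × List Int) : Prop := out = y2sentiment_alt labels
instance (labels : List String) (out : List (List Int) × List Int) : Decidable (Spec_y2sentiment labels out) := by unfold Spec_y2sentiment; infer_instance

-- ===== CLAIM (what is proved, stated in full; the proofs are below) =====
def Claim_equal_y2sentiment : Prop := ∀ (labels : List String), Dom_y2sentiment labels → Spec_y2sentiment labels (y2sentiment labels)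

-- ===== LEMMAS AND PROOFS =====

-- the one-hot vector B's leaf produces for a line
def pvHot (line : String) : List Int :=
  pvOneHotTable.getD (PySem.Str.slice line none (some 3)) [0, 1, 0]

-- count (as Int) of lines whose one-hot is h
def pvCnt (h : List Int) (labels : List String) : Int :=
  ((labels.map pvHot).count h : Nat)

theorem pvHot_eq (line : String) :
    pvHot line
    = if PySem.Str.slice line none (some 3) = "NEG" then [1,0,0]
      else if PySem.Str.slice line none (some 3) = "POS" then [0,0,1] else [0,1,0] := by
  have htab : pvOneHotTable = PySem.Dict.mk [("NEG",[1,0,0]),("POS",[0,0,1])] := by decide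
  unfold pvHot
  by_cases h0 : PySem.Str.slice line none (some 3) = "NEG"
  · rw [h0, htab]; decide
  · by_cases h2 : PySem.Str.slice line none (some 3) = "POS"
    · rw [h2, htab]; decide
    · have b1 : (("NEG" : String) == PySem.Str.slice line none (some 3)) = false :=
        beq_eq_false_iff_ne.mpr (fun h => h0 h.symm)
      have b2 : (("POS" : String) == PySem.Str.slice line none (some 3)) = false :=
        beq_eq_false_iff_ne.mpr (fun h => h2 h.symm)
      rw [htab, PySem.Dict.getD_eq_get?_getD, PySem.Dict.get?_mk_cons, b1]
      simp only [Bool.false_eq_true, if_false]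
      rw [PySem.Dict.get?_mk_cons, b2]
      simp [h0, h2, PySem.Dict.get?]

theorem pvHot_cases (line : String) :
    pvHot line = [1,0,0] ∨ pvHot line = [0,1,0] ∨ pvHot line = [0,0,1] := by
  rw [pvHot_eq]; split_ifs <;> simp

-- common characterisation both programs are reduced to
def pvSpec (labels : List String) : List (List Int) × List Int :=
  (labels.map pvHot,
   [pvCnt [1,0,0] labels, pvCnt [0,1,0] labels, pvCnt [0,0,1] labels])

theorem pvCnt_append (h : List Int) (l r : List String) :
    pvCnt h (l ++ r) = pvCnt h l + pvCnt h r := by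
  simp [pvCnt, List.count_append]

theorem pvCnt_single (h : List Int) (l : String) :
    pvCnt h [l] = if pvHot l = h then 1 else 0 := by
  by_cases hh : pvHot l = h <;> simp [pvCnt, hh]

-- A's loop invariant
theorem pvA_loop (labels : List String) :
    ∀ (s : List (List Int)) (d0 d1 d2 : Int),
      labels.foldl pvStepA (s, [d0, d1, d2])
      = (s ++ labels.map pvHot,
         [d0 + pvCnt [1,0,0] labels,
          d1 + pvCnt [0,1,0] labels,
          d2 + pvCnt [0,0,1] labels]) := by
  induction labels with
  | nil => intro s d0 d1 d2; simp [pvCnt]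
  | cons hd tl ih =>
    intro s d0 d1 d2
    rw [List.foldl_cons]
    have hc0 : pvCnt [1,0,0] (hd :: tl) = pvCnt [1,0,0] [hd] + pvCnt [1,0,0] tl := by
      simpa using pvCnt_append [1,0,0] [hd] tl
    have hc1 : pvCnt [0,1,0] (hd :: tl) = pvCnt [0,1,0] [hd] + pvCnt [0,1,0] tl := by
      simpa using pvCnt_append [0,1,0] [hd] tl
    have hc2 : pvCnt [0,0,1] (hd :: tl) = pvCnt [0,0,1] [hd] + pvCnt [0,0,1] tl := by
      simpa using pvCnt_append [0,0,1] [hd] tl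
    by_cases h0 : PySem.Str.slice hd none (some 3) = "NEG"
    · have hhot : pvHot hd = [1,0,0] := by rw [pvHot_eq]; simp [h0]
      have hstep : pvStepA (s, [d0, d1, d2]) hd = (s ++ [[1, 0, 0]], [d0 + 1, d1, d2]) := by
        simp [pvStepA, h0]
      rw [hstep, ih, hc0, hc1, hc2]
      simp [pvCnt_single, hhot]
      omega
    · by_cases h2 : PySem.Str.slice hd none (some 3) = "POS"
      · have hhot : pvHot hd = [0,0,1] := by rw [pvHot_eq]; simp [h2]
        have hstep : pvStepA (s, [d0, d1, d2]) hd = (s ++ [[0, 0, 1]], [d0, d1, d2 + 1]) := by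
          simp [pvStepA, h2]
        rw [hstep, ih, hc0, hc1, hc2]
        simp [pvCnt_single, hhot]
        omega
      · have hhot : pvHot hd = [0,1,0] := by rw [pvHot_eq]; simp [h0, h2]
        have hstep : pvStepA (s, [d0, d1, d2]) hd = (s ++ [[0, 1, 0]], [d0, d1 + 1, d2]) := by
          simp [pvStepA, h0, h2]
        rw [hstep, ih, hc0, hc1, hc2]
        simp [pvCnt_single, hhot]
        omega

theorem pvA_spec (labels : List String) : y2sentiment labels = pvSpec labels := by
  unfold y2sentiment pvSpec
  rw [pvA_loop labels [] 0 0 0]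
  simp

theorem pvB_spec (labels : List String) : y2sentiment_alt labels = pvSpec labels := by
  induction labels using y2sentiment_alt.induct with
  | case1 => simp [y2sentiment_alt, pvSpec, pvCnt]
  | case2 l =>
    have h1 : y2sentiment_alt [l] = ([pvHot l], pvHot l) := by
      rw [y2sentiment_alt]; rfl
    rw [h1]
    rcases pvHot_cases l with h | h | h <;>
      simp [pvSpec, pvCnt_single, h]
  | case3 l1 l2 rest labels mid ihl ihr =>
    have h1 : y2sentiment_alt (l1 :: l2 :: rest)
        = ((y2sentiment_alt ((l1 :: l2 :: rest).take ((l1 :: l2 :: rest).length / 2))).1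
            ++ (y2sentiment_alt ((l1 :: l2 :: rest).drop ((l1 :: l2 :: rest).length / 2))).1,
           List.zipWith (· + ·)
            (y2sentiment_alt ((l1 :: l2 :: rest).take ((l1 :: l2 :: rest).length / 2))).2
            (y2sentiment_alt ((l1 :: l2 :: rest).drop ((l1 :: l2 :: rest).length / 2))).2) := by
      rw [y2sentiment_alt]
    rw [h1, ihl, ihr]
    have hsplit : (l1 :: l2 :: rest) =
        (l1 :: l2 :: rest).take ((l1 :: l2 :: rest).length / 2)
        ++ (l1 :: l2 :: rest).drop ((l1 :: l2 :: rest).length / 2) := by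
      simp
    simp only [pvSpec]
    conv_rhs => rw [hsplit]
    simp [List.zipWith]
    refine ⟨rfl, ?_, ?_, ?_⟩ <;>
      rw [← pvCnt_append, List.take_append_drop]

-- ===== VERDICT (by name: the statement is the Claim_ definition above) =====
theorem y2sentiment_spec : Claim_equal_y2sentiment := by
  intro labels _
  unfold Spec_y2sentiment
  rw [pvA_spec, pvB_spec]
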